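-- pv_equiv track=rewrite | github.com/angelAL2910/SatMapper | msdescgen.py | patternDetect
-- ===== SOURCE A (Python) =====
-- def patternDetect(cad,patlen):
-- 	'''This method detects a tandem repeatd pattern in a string'''
-- 	pattern=""
-- 	for i in range(patlen):
-- 		lettersatpos=cad[i::patlen]
-- 		mostrepeated={}
-- 		for i in lettersatpos:
-- 			mostrepeated.setdefault(i,0)
-- 			mostrepeated[i]+=1
-- 		mostrepeated=[i[::-1] for i in mostrepeated.items()]
-- 		mostrepeated.sort(reverse=True)
-- 		pattern+=mostrepeated[0][1]
--
-- 	return pattern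
-- ===== SOURCE B (Python) =====
-- def patternDetect(cad, patlen):
--     '''Single pass over the string with a rolling position counter: count characters
--     per modular position in one traversal, then pick each position's most frequent
--     character (ties toward the larger character) with max.'''
--     table = {}
--     pos = 0
--     for ch in cad:
--         counts = table.setdefault(pos, {})
--         counts[ch] = counts.get(ch, 0) + 1
--         pos += 1
--         if pos == patlen:
--             pos = 0
--     out = []
--     for p in range(patlen):
--         best = max((n, c) for c, n in table[p].items())
--         out.append(best[1])
--     return "".join(out)
-- ===== Notes on version B (the rewrite author's own statement) =====
-- stated objective: alternative
-- what changed: A makes patlen passes, each slicing cad[i::patlen], counting into a dict and sorting the (count,char) pairs in reverse to take the first; B makes one single pass over the string with a rolling position counter that builds a table of per-position count dicts, then selects each position's winner with max over (count,char) tuples.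
import Mathlib
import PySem

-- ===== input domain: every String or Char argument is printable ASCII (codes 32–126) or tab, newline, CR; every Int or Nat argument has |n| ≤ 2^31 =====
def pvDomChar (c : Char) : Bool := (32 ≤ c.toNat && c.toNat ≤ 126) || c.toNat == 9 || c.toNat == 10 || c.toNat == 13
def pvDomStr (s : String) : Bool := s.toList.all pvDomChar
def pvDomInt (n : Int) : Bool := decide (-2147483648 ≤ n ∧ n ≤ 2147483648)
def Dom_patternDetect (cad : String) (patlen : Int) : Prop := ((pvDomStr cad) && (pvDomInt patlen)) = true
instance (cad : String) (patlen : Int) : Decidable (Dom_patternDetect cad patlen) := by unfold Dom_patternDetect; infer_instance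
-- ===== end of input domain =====

-- B replaces A's per-position slicing-and-sorting with a single pass over the string
-- (a rolling position counter feeding a table of per-position character counts)
-- followed by a max-selection per position; objective: alternative.

-- ===== PORT A =====
-- body of one iteration of A's 'for i in range(patlen)' loop: slice cad[i::patlen],
-- count into a dict via setdefault/+=, swap the items ('i[::-1]' on a pair), sort with
-- reverse=True (Python compares the (count, char) tuples lexicographically), take
-- [0][1].  'mostrepeated[0]' raises IndexError when the slice is empty (only when
-- patlen > len(cad)): pyGet? is none exactly there — excluded by Pre_ — and getD
-- supplies a dummy pair outside Pre_.
def aPos (cad : String) (patlen : Int) (i : Int) : Char :=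
  let lettersatpos := (PySem.List.slice? cad.toList (some i) none patlen).getD []
  let mostrepeated := lettersatpos.foldl
    (fun d c => ((d.setdefault c 0).insert c ((d.setdefault c 0).getD c 0 + 1)))
    (PySem.Dict.empty : PySem.Dict Char Int)
  let pairs := mostrepeated.items.map (fun q => (q.2, q.1))
  let srt := PySem.List.sorted2 pairs (fun x => x.1) (fun x => x.2) true
  ((PySem.List.pyGet? srt 0).getD (0, ' ')).2

-- literal transliteration of A: pattern += aPos(i) for i in range(patlen)
def patternDetect (cad : String) (patlen : Int) : String :=
  String.ofList ((PySem.List.pyRange 0 patlen 1).foldl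
    (fun pattern i => pattern ++ [aPos cad patlen i]) [])

-- ===== PORT B =====
-- B's single pass: fold over the characters carrying (table, pos);
-- 'counts = table.setdefault(pos, {})' followed by the in-place update of counts is
-- the insert of the updated inner dict at key pos (same position, appended if fresh).
def bTable (cad : String) (patlen : Int) : PySem.Dict Int (PySem.Dict Char Int) :=
  (cad.toList.foldl
    (fun (s : PySem.Dict Int (PySem.Dict Char Int) × Int) ch =>
      let counts := (s.1.get? s.2).getD PySem.Dict.empty
      let counts' := counts.insert ch (counts.getD ch 0 + 1)
      let pos' := s.2 + 1
      (s.1.insert s.2 counts', if pos' = patlen then 0 else pos'))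
    (PySem.Dict.empty, 0)).1

-- 'max((n, c) for c, n in table[p].items())[1]': table[p] raises KeyError exactly when
-- position p was never filled (patlen > len(cad)) — excluded by Pre_; get?/max2? are
-- none there and getD supplies a dummy pair outside Pre_.
def bPos (table : PySem.Dict Int (PySem.Dict Char Int)) (p : Int) : Char :=
  let counts := (table.get? p).getD PySem.Dict.empty
  ((PySem.List.max2? (counts.items.map (fun q => (q.2, q.1)))
    (fun x => x.1) (fun x => x.2)).getD (0, ' ')).2

-- literal transliteration of Source B: one pass building the table, then
-- "".join of the per-position winners over range(patlen)
def patternDetect_alt (cad : String) (patlen : Int) : String :=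
  let st := bTable cad patlen
  String.ofList ((PySem.List.pyRange 0 patlen 1).foldl
    (fun out p => out ++ [bPos st p]) [])

-- ===== PRECONDITION & SPEC =====
-- A raises IndexError exactly when 1 ≤ patlen and patlen > len(cad) (the slice at
-- position len(cad) is empty); Pre_ excludes exactly those inputs, i.e. it admits
-- every input on which A returns (including every patlen ≤ 0, where A returns "").
def Pre_patternDetect (cad : String) (patlen : Int) : Prop :=
  patlen ≤ (cad.toList.length : Int) ∨ patlen ≤ 0
instance (cad : String) (patlen : Int) : Decidable (Pre_patternDetect cad patlen) := by
  unfold Pre_patternDetect; infer_instance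
def pvWitness_patternDetect : String × Int := ("abcabcabd", 3)

def Spec_patternDetect (cad : String) (patlen : Int) (out : String) : Prop := out = patternDetect_alt cad patlen
instance (cad : String) (patlen : Int) (out : String) : Decidable (Spec_patternDetect cad patlen out) := by unfold Spec_patternDetect; infer_instance

-- ===== CLAIM (what is proved, stated in full; the proofs are below) =====
def Claim_equal_patternDetect : Prop := ∀ (cad : String) (patlen : Int), Dom_patternDetect cad patlen → Pre_patternDetect cad patlen → Spec_patternDetect cad patlen (patternDetect cad patlen)

-- ===== LEMMAS AND PROOFS =====

-- the head of a descending (reverse=True) Python sort is the first maximal element,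
-- i.e. exactly what Python's max with the same tuple key returns
theorem sorted2_head?_eq_max2? {α : Type} (k1 : α → Int) (k2 : α → Char) (xs : List α) :
    (PySem.List.sorted2 xs k1 k2 true).head? = PySem.List.max2? xs k1 k2 := by
  induction xs using List.reverseRecOn with
  | nil => rfl
  | append_singleton xs x ih =>
    simp only [PySem.List.sorted2, PySem.List.max2?, List.foldl_append, List.foldl_cons,
      List.foldl_nil, if_true] at *
    cases h : List.foldl (fun acc x => PySem.List.insertBy _ x acc) ([] : List α) xs with
    | nil =>
      rw [h] at ih
      simp only [List.head?_nil] at ih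
      rw [← ih]
      simp [PySem.List.insertBy]
    | cons y ys =>
      rw [h] at ih
      simp only [List.head?_cons] at ih
      rw [← ih]
      simp only [PySem.List.insertBy]
      by_cases hb : (decide (k1 y < k1 x) || !decide (k1 x < k1 y) && decide (k2 y < k2 x)) = true
      · simp [hb]
      · simp [hb]

-- Python's xs[0] on a list, total form: pyGet? at index 0 is head?
theorem pyGet?_zero {α : Type} (xs : List α) : PySem.List.pyGet? xs 0 = xs.head? := by
  cases xs <;> simp [PySem.List.pyGet?, PySem.List.pyIdx?]

-- A's setdefault-then-increment step is the plain counting insert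
theorem setdefault_step (d : PySem.Dict Char Int) (c : Char) :
    ((d.setdefault c 0).insert c ((d.setdefault c 0).getD c 0 + 1))
      = d.insert c (d.getD c 0 + 1) := by
  by_cases hc : d.contains c = true
  · rw [PySem.Dict.setdefault_of_contains _ _ hc]
  · rw [PySem.Dict.setdefault_of_not_contains _ _ (by simpa using hc)]
    rw [PySem.Dict.getD_insert_self, PySem.Dict.insert_insert_self,
      PySem.Dict.getD_of_not_contains _ _ (by simpa using hc)]

-- the counting fold both ports' inner counters reduce to
def cnt (d : PySem.Dict Char Int) (xs : List Char) : PySem.Dict Char Int :=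
  xs.foldl (fun d c => d.insert c (d.getD c 0 + 1)) d

-- the characters B's rolling counter files under position p, starting at position q
def sel (pl : Int) : List Char → Int → Int → List Char
  | [], _, _ => []
  | c :: l, q, p => (if q = p then [c] else []) ++ sel pl l (if q + 1 = pl then 0 else q + 1) p

-- closed form of the strided slice cad[s::st] (natural start and step)
def Cl (xs : List Char) (s st : Nat) : List Char :=
  (List.range (if s < xs.length then (xs.length - s + st - 1) / st else 0)).filterMap
    (fun k => xs[s + st * k]?)

theorem Cl_cons (c : Char) (l : List Char) (s st : Nat) (hst : 1 ≤ st) :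
    Cl (c :: l) s st
      = (if s = 0 then [c] else []) ++ Cl l (if s = 0 then st - 1 else s - 1) st := by
  rcases s with _ | s'
  · simp only [Cl, List.length_cons, Nat.zero_lt_succ, if_true, Nat.zero_add]
    have h1 : l.length + 1 - 0 + st - 1 = l.length + st := by omega
    rw [h1, Nat.add_div_right _ (by omega), List.range_succ_eq_map]
    have h2 : (if st - 1 < l.length then (l.length - (st - 1) + st - 1) / st else 0)
        = l.length / st := by
      by_cases hc : st - 1 < l.length
      · rw [if_pos hc]; congr 1; omega
      · rw [if_neg hc, Nat.div_eq_of_lt (by omega)]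
    rw [h2]
    simp only [List.filterMap_cons, List.filterMap_map, Nat.mul_zero, List.getElem?_cons_zero,
      List.singleton_append]
    congr 1
    apply List.filterMap_congr
    intro k _
    have h3 : st * (k + 1) = (st - 1 + st * k) + 1 := by
      cases st with | zero => omega | succ t => ring_nf; omega
    simp only [Function.comp_apply, h3, List.getElem?_cons_succ]
  · simp only [Cl, List.length_cons, if_neg (by omega : ¬ s' + 1 = 0), List.nil_append,
      Nat.add_sub_cancel]
    have h1 : (if s' + 1 < l.length + 1 then (l.length + 1 - (s' + 1) + st - 1) / st else 0)
        = (if s' < l.length then (l.length - s' + st - 1) / st else 0) := by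
      by_cases hc : s' < l.length
      · rw [if_pos (by omega), if_pos hc]; congr 2; omega
      · rw [if_neg (by omega), if_neg hc]
    rw [h1]
    apply List.filterMap_congr
    intro k _
    have h3 : s' + 1 + st * k = (s' + st * k) + 1 := by omega
    rw [h3, List.getElem?_cons_succ]

-- the PySem strided slice equals its closed form
theorem slice?_eq_Cl (xs : List Char) (s st : Nat) (hst : 1 ≤ st) :
    (PySem.List.slice? xs (some (s : Int)) none (st : Int)).getD [] = Cl xs s st := by
  have hst0 : ((st : Int)) ≠ 0 := by exact_mod_cast Nat.one_le_iff_ne_zero.mp hst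
  have hstpos : (0:Int) < st := by positivity
  simp only [PySem.List.slice?, PySem.List.sliceIndices, if_neg hst0,
    if_neg (by omega : ¬ (st:Int) < 0), if_pos hstpos]
  by_cases hcase : s < xs.length
  · simp only [if_neg (by omega : ¬ ((s:Int)) < 0),
      min_eq_left (by exact_mod_cast hcase.le : ((s:Int)) ≤ (xs.length : Int)),
      if_pos (by exact_mod_cast hcase : ((s:Int)) < (xs.length : Int))]
    have hc1 : ((xs.length : Int)) - s + st - 1 = ((xs.length - s + st - 1 : Nat) : Int) := by
      omega
    rw [hc1, ← Int.natCast_div, Int.toNat_natCast, Option.getD_some, Cl, if_pos hcase]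
    apply List.filterMap_congr
    intro k _
    have hidx : ((s:Int) + st * k).toNat = s + st * k := by
      have : ((s:Int) + st * k) = ((s + st * k : Nat) : Int) := by push_cast; ring
      rw [this, Int.toNat_natCast]
    rw [hidx]
  · simp only [if_neg (by omega : ¬ ((s:Int)) < 0),
      min_eq_right (by exact_mod_cast Nat.le_of_not_lt hcase : (xs.length : Int) ≤ ((s:Int))),
      lt_irrefl, if_false, List.range_zero, List.filterMap_nil, Option.getD_some, Cl,
      if_neg hcase]

-- B's table entry at p after the rolling fold counts exactly sel's characters
theorem tableB_getD (pl : Int) :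
    ∀ (l : List Char) (t : PySem.Dict Int (PySem.Dict Char Int)) (q p : Int),
    (((l.foldl
      (fun (s : PySem.Dict Int (PySem.Dict Char Int) × Int) ch =>
        let counts := (s.1.get? s.2).getD PySem.Dict.empty
        let counts' := counts.insert ch (counts.getD ch 0 + 1)
        let pos' := s.2 + 1
        (s.1.insert s.2 counts', if pos' = pl then 0 else pos'))
      (t, q)).1.get? p).getD PySem.Dict.empty)
      = cnt ((t.get? p).getD PySem.Dict.empty) (sel pl l q p) := by
  intro l
  induction l with
  | nil => intro t q p; rfl
  | cons c l ih =>
    intro t q p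
    simp only [List.foldl_cons]
    rw [ih]
    by_cases hpq : p = q
    · subst hpq
      rw [PySem.Dict.get?_insert]
      simp only [sel]
      rfl
    · rw [PySem.Dict.get?_insert]
      simp only [if_neg hpq, sel, if_neg (fun h => hpq (Eq.symm h)), List.nil_append]

theorem emod_small (a pl : Int) (_hpl : 0 < pl) (h2 : -pl ≤ a) (h3 : a < pl) :
    a % pl = if a < 0 then a + pl else a := by
  split
  · rw [← Int.add_mul_emod_self_left (a := a) (b := pl) (c := 1),
      (by ring : a + pl * 1 = a + pl)]
    exact Int.emod_eq_of_lt (by omega) (by omega)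
  · exact Int.emod_eq_of_lt (by omega) h3

-- sel equals the closed-form slice starting at (p - q) mod pl
theorem sel_eq_Cl (pl : Int) (hpl : 0 < pl) :
    ∀ (l : List Char) (q p : Int), 0 ≤ q → q < pl → 0 ≤ p → p < pl →
    sel pl l q p = Cl l (((p - q) % pl).toNat) pl.toNat := by
  intro l
  induction l with
  | nil =>
    intro q p _ _ _ _
    simp [sel, Cl]
  | cons c l ih =>
    intro q p hq0 hq1 hp0 hp1
    have hstn : 1 ≤ pl.toNat := by omega
    by_cases hro : q + 1 = pl
    · rw [sel, if_pos hro, ih _ p (by omega) (by omega) hp0 hp1, Cl_cons _ _ _ _ hstn,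
        emod_small (p - q) pl hpl (by omega) (by omega),
        emod_small (p - 0) pl hpl (by omega) (by omega)]
      split_ifs <;> first | rfl | (exfalso; omega) | (congr 2 <;> omega)
    · rw [sel, if_neg hro, ih _ p (by omega) (by omega) hp0 hp1, Cl_cons _ _ _ _ hstn,
        emod_small (p - q) pl hpl (by omega) (by omega),
        emod_small (p - (q + 1)) pl hpl (by omega) (by omega)]
      split_ifs <;> first | rfl | (exfalso; omega) | (congr 2 <;> omega)

-- per-position agreement: A's slice-count-sort-head equals B's table-max
theorem pos_agree (cad : String) (patlen : Int) (i : Int) (h0 : 0 ≤ i) (h1 : i < patlen) :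
    aPos cad patlen i = bPos (bTable cad patlen) i := by
  have hi : ((i.toNat : Nat) : Int) = i := Int.toNat_of_nonneg h0
  have hp : ((patlen.toNat : Nat) : Int) = patlen := Int.toNat_of_nonneg (by omega)
  have hslice : (PySem.List.slice? cad.toList (some i) none patlen).getD []
      = Cl cad.toList i.toNat patlen.toNat := by
    rw [← hi, ← hp, slice?_eq_Cl _ _ _ (by omega), Int.toNat_natCast, Int.toNat_natCast]
  have hsel : sel patlen cad.toList 0 i = Cl cad.toList i.toNat patlen.toNat := by
    rw [sel_eq_Cl patlen (by omega) cad.toList 0 i le_rfl (by omega) h0 h1]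
    rw [(by omega : i - 0 = i), Int.emod_eq_of_lt h0 h1]
  have htab : ((bTable cad patlen).get? i).getD PySem.Dict.empty
      = cnt PySem.Dict.empty (Cl cad.toList i.toNat patlen.toNat) := by
    rw [bTable, tableB_getD patlen cad.toList PySem.Dict.empty 0 i, hsel]
    rfl
  simp only [aPos, bPos, setdefault_step]
  rw [hslice, htab, cnt, pyGet?_zero, sorted2_head?_eq_max2?]

-- ===== VERDICT (by name: the statement is the Claim_ definition above) =====
theorem patternDetect_spec : Claim_equal_patternDetect := by
  intro cad patlen _hdom _hpre
  unfold Spec_patternDetect patternDetect patternDetect_alt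
  congr 1
  rw [PySem.List.foldl_append_singleton_eq_map, PySem.List.foldl_append_singleton_eq_map]
  simp only [List.nil_append]
  apply List.map_congr_left
  intro i hi
  rw [PySem.List.mem_pyRange_one] at hi
  exact pos_agree cad patlen i hi.1 hi.2
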